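-- pv_equiv track=rewrite | github.com/epoyraz/leetcode | solutions/3714.py | minMaxSums
-- ===== SOURCE A (Python) =====
-- def minMaxSums(nums, k):
--     """
--     :type nums: List[int]
--     :type k:    int
--     :rtype:     int
--     """
--     MOD = 10**9 + 7
--     n = len(nums)
--
--     # 1) Precompute factorials & inv-factorials up to n
--     fac    = [1] * (n+1)
--     invfac = [1] * (n+1)
--     for i in range(1, n+1):
--         fac[i] = fac[i-1] * i % MOD
--     invfac[n] = pow(fac[n], MOD-2, MOD)
--     for i in range(n, 0, -1):
--         invfac[i-1] = invfac[i] * i % MOD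
--
--     def comb(a, b):
--         if b < 0 or b > a:
--             return 0
--         return fac[a] * invfac[b] % MOD * invfac[a-b] % MOD
--
--     # 2) Precompute f(i) = sum_{t=0..min(i,k-1)} C(i, t)
--     f = [0] * n
--     # powers of 2 up to k-1
--     pow2 = [1] * k
--     for i in range(1, k):
--         pow2[i] = (pow2[i-1] * 2) % MOD
--
--     for i in range(n):
--         if i < k:
--             # f(i) = 2^i
--             f[i] = pow2[i]
--         else:
--             # f(i) = 2*f(i-1) - C(i-1, k-1)
--             val = (2 * f[i-1] - comb(i-1, k-1)) % MOD
--             f[i] = val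
--
--     # 3) Sort the array
--     A = sorted(nums)
--
--     # 4) Sum up max-contributions and min-contributions
--     ans = 0
--     for i, v in enumerate(A):
--         ans = (ans + v * f[i] + v * f[n-1-i]) % MOD
--
--     return ans
-- ===== SOURCE B (Python) =====
-- def minMaxSums(nums, k):
--     """
--     :type nums: List[int]
--     :type k:    int
--     :rtype:     int
--     """
--     MOD = 10**9 + 7
--     n = len(nums)
--     if k <= 0:
--         return 0
--
--     # Same factorial / inverse-factorial tables and comb helper as usual
--     fac = [1] * (n+1)
--     for i in range(1, n+1):
--         fac[i] = fac[i-1] * i % MOD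
--     invfac = [1] * (n+1)
--     invfac[n] = pow(fac[n], MOD-2, MOD)
--     for i in range(n, 0, -1):
--         invfac[i-1] = invfac[i] * i % MOD
--
--     def comb(a, b):
--         if b < 0 or b > a:
--             return 0
--         return fac[a] * invfac[b] % MOD * invfac[a-b] % MOD
--
--     A = sorted(nums)
--
--     # Closed-form coefficient: the number of k'-subsets (k' <= k) in which a given
--     # sorted position is extremal is sum_{t<k} C(i,t) = 2^i - sum_{t=k-1}^{i-1} 2^(i-1-t)*C(t,k-1),
--     # computed directly per element instead of A's f-array recurrence and pow2 table.
--     def coef(i):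
--         s = pow(2, i, MOD)
--         for t in range(k-1, i):
--             s = (s - pow(2, i-1-t, MOD) * comb(t, k-1)) % MOD
--         return s
--
--     ans = 0
--     for i in range(n):
--         ans = (ans + A[i] * (coef(i) + coef(n-1-i))) % MOD
--     return ans
-- ===== Notes on version B (the rewrite author's own statement) =====
-- stated objective: alternative
-- what changed: B drops A's f-array, pow2 table and linear recurrence and instead computes each sorted element's min+max coefficient directly by the closed form 2^i - sum_{t=k-1}^{i-1} 2^(i-1-t)*comb(t,k-1), with an early return 0 when k <= 0 (no subset sizes to count).
import Mathlib
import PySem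

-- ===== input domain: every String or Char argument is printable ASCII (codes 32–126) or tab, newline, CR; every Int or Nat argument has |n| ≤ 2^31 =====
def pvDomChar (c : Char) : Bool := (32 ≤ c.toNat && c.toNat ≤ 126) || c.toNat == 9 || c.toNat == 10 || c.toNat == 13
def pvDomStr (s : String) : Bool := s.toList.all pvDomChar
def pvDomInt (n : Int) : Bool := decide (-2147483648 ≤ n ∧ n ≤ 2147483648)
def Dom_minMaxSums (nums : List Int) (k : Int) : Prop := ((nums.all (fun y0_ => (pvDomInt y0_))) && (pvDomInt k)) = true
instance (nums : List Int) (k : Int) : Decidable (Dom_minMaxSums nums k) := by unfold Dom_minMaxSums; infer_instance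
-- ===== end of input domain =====

-- B replaces A's f-array recurrence and pow2 table by a per-element closed-form coefficient
-- (2^i minus a sum of weighted binomials) with an early 0 for k <= 0; proved equal on all inputs.


-- ===== PORT A =====
-- helpers shared by both ports: both Python sources contain the identical
-- factorial / inverse-factorial tables and the identical comb(a, b) helper.
def pvMOD : Int := 1000000007

-- Python's three-argument pow(fac[n], MOD-2, MOD), ported by hand as binary
-- exponentiation so the port is evaluable at exponent MOD-2; exact for m > 0.
def pvPowMod (b : Int) (e : Nat) (m : Int) : Int :=
  match e with
  | 0 => PySem.Int.mod 1 m
  | e' + 1 =>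
    let h := pvPowMod b ((e' + 1) / 2) m
    if (e' + 1) % 2 = 0 then PySem.Int.mod (h * h) m
    else PySem.Int.mod (PySem.Int.mod (h * h) m * b) m
termination_by e
decreasing_by omega

-- fac = [1]*(n+1); for i in range(1, n+1): fac[i] = fac[i-1] * i % MOD
def pvFacList (n : Nat) : List Int :=
  (PySem.List.pyRange 1 ((n : Int) + 1) 1).foldl
    (fun fac i => PySem.List.pySetD fac i (PySem.Int.mod (PySem.List.pyGetD fac (i - 1) 0 * i) pvMOD))
    (List.replicate (n + 1) 1)

-- invfac = [1]*(n+1); invfac[n] = pow(fac[n], MOD-2, MOD);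
-- for i in range(n, 0, -1): invfac[i-1] = invfac[i] * i % MOD
def pvInvfacList (n : Nat) (fac : List Int) : List Int :=
  (PySem.List.pyRange (n : Int) 0 (-1)).foldl
    (fun invfac i => PySem.List.pySetD invfac (i - 1) (PySem.Int.mod (PySem.List.pyGetD invfac i 0 * i) pvMOD))
    (PySem.List.pySetD (List.replicate (n + 1) 1) (n : Int)
      (pvPowMod (PySem.List.pyGetD fac (n : Int) 0) 1000000005 pvMOD))

-- def comb(a, b): if b < 0 or b > a: return 0; return fac[a]*invfac[b] % MOD * invfac[a-b] % MOD
def pvComb (fac invfac : List Int) (a b : Int) : Int :=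
  if b < 0 ∨ b > a then 0
  else PySem.Int.mod
    (PySem.Int.mod (PySem.List.pyGetD fac a 0 * PySem.List.pyGetD invfac b 0) pvMOD *
      PySem.List.pyGetD invfac (a - b) 0) pvMOD

def minMaxSums (nums : List Int) (k : Int) : Int :=
  let n : Nat := nums.length
  let fac := pvFacList n
  let invfac := pvInvfacList n fac
  -- pow2 = [1]*k; for i in range(1, k): pow2[i] = pow2[i-1] * 2 % MOD
  -- the Python preallocates [1]*k and fills positions 1..k-1 sequentially, each from the
  -- previous entry; ported as a prefix accumulator (cons of pow2[i-1]*2 % MOD, i.e. the head,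
  -- reversed at the end) so the same sequential fill evaluates in O(k) — positions not yet
  -- written are never read, so the values are identical (proved by pow2_eq below)
  let pow2 := ((PySem.List.pyRange 1 k 1).foldl
    (fun p _i => PySem.Int.mod (p.headD 0 * 2) pvMOD :: p)
    (List.replicate (min k.toNat 1) 1)).reverse
  -- f = [0]*n; for i in range(n): if i < k: f[i] = pow2[i] else: f[i] = (2*f[i-1] - comb(i-1, k-1)) % MOD
  let f := (PySem.List.pyRange 0 (n : Int) 1).foldl
    (fun f i =>
      if i < k then PySem.List.pySetD f i (PySem.List.pyGetD pow2 i 0)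
      else PySem.List.pySetD f i
        (PySem.Int.mod (2 * PySem.List.pyGetD f (i - 1) 0 - pvComb fac invfac (i - 1) (k - 1)) pvMOD))
    (List.replicate n 0)
  let A := PySem.List.sorted nums (fun x => x) false
  -- for i, v in enumerate(A): ans = (ans + v*f[i] + v*f[n-1-i]) % MOD
  (PySem.List.enumerate A 0).foldl
    (fun ans iv =>
      PySem.Int.mod (ans + iv.2 * PySem.List.pyGetD f iv.1 0 + iv.2 * PySem.List.pyGetD f ((n : Int) - 1 - iv.1) 0) pvMOD)
    0

-- ===== PORT B =====
-- def coef(i): s = pow(2, i, MOD); for t in range(k-1, i): s = (s - pow(2, i-1-t, MOD)*comb(t, k-1)) % MOD; return s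
-- (pow(2, e, MOD) with e >= 0 is PySem.Int.powMod 2 e.toNat pvMOD; both exponents are >= 0 where evaluated)
def pvCoefB (fac invfac : List Int) (k i : Int) : Int :=
  (PySem.List.pyRange (k - 1) i 1).foldl
    (fun s t => PySem.Int.mod (s - PySem.Int.powMod 2 (i - 1 - t).toNat pvMOD * pvComb fac invfac t (k - 1)) pvMOD)
    (PySem.Int.powMod 2 i.toNat pvMOD)

def minMaxSums_alt (nums : List Int) (k : Int) : Int :=
  let n : Nat := nums.length
  if k ≤ 0 then 0
  else
    let fac := pvFacList n
    let invfac := pvInvfacList n fac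
    let A := PySem.List.sorted nums (fun x => x) false
    -- for i in range(n): ans = (ans + A[i]*(coef(i)+coef(n-1-i))) % MOD
    (PySem.List.pyRange 0 (n : Int) 1).foldl
      (fun ans i =>
        PySem.Int.mod (ans + PySem.List.pyGetD A i 0 *
          (pvCoefB fac invfac k i + pvCoefB fac invfac k ((n : Int) - 1 - i))) pvMOD)
      0

-- ===== PRECONDITION & SPEC =====
def Spec_minMaxSums (nums : List Int) (k : Int) (out : Int) : Prop := out = minMaxSums_alt nums k
instance (nums : List Int) (k : Int) (out : Int) : Decidable (Spec_minMaxSums nums k out) := by unfold Spec_minMaxSums; infer_instance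

-- ===== CLAIM (what is proved, stated in full; the proofs are below) =====
def Claim_equal_minMaxSums : Prop := ∀ (nums : List Int) (k : Int), Dom_minMaxSums nums k → Spec_minMaxSums nums k (minMaxSums nums k)

-- ===== LEMMAS AND PROOFS =====

theorem pvMOD_pos : (0:Int) < pvMOD := by norm_num [pvMOD]

theorem castM (a : Int) : ((a % (1000000007:Int) : Int) : ZMod 1000000007) = (a : ZMod 1000000007) := by
  have h : (1000000007 : ZMod 1000000007) = 0 := by
    exact_mod_cast ZMod.natCast_self 1000000007
  rw [Int.emod_def]
  push_cast
  rw [h]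
  ring

theorem castPy (a : Int) : ((PySem.Int.mod a pvMOD : Int) : ZMod 1000000007) = (a : ZMod 1000000007) := by
  rw [PySem.Int.mod_eq_emod_of_pos pvMOD_pos]
  exact castM a

theorem modPy_range (a : Int) : 0 ≤ PySem.Int.mod a pvMOD ∧ PySem.Int.mod a pvMOD < 1000000007 := by
  refine ⟨PySem.Int.mod_nonneg a pvMOD_pos, ?_⟩
  have := PySem.Int.mod_lt a pvMOD_pos
  simpa [pvMOD] using this

def p2v : Nat → Int
  | 0 => 1
  | i + 1 => PySem.Int.mod (p2v i * 2) pvMOD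

theorem pow2_aux (k : Int) (hk : 1 ≤ k) :
    ∀ m : Nat, 1 ≤ m → m ≤ k.toNat →
      (PySem.List.pyRange 1 (m : Int) 1).foldl
        (fun p _i => PySem.Int.mod (p.headD 0 * 2) pvMOD :: p)
        (List.replicate (min k.toNat 1) 1)
      = ((List.range m).map p2v).reverse := by
  have hmin : min k.toNat 1 = 1 := by omega
  intro m
  induction m with
  | zero => omega
  | succ m ih =>
    intro _ hm
    by_cases hm1 : m = 0
    · subst hm1
      rw [PySem.List.pyRange_one_eq_nil (by norm_num)]
      simp [hmin, p2v]
    · have hc : ((m + 1 : Nat) : Int) = ((m : Nat) : Int) + 1 := by push_cast; ring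
      rw [hc, PySem.List.pyRange_one_succ_right (by omega), List.foldl_append,
        ih (by omega) (by omega)]
      simp only [List.foldl_cons, List.foldl_nil]
      have hrange : List.range m = List.range (m - 1) ++ [m - 1] := by
        have : m = (m - 1) + 1 := by omega
        conv_lhs => rw [this]
        rw [List.range_succ]
      have hhead : (((List.range m).map p2v).reverse).headD 0 = p2v (m - 1) := by
        rw [hrange]
        simp
      rw [hhead]
      have hp2 : PySem.Int.mod (p2v (m - 1) * 2) pvMOD = p2v m := by
        have : m = (m - 1) + 1 := by omega
        conv_rhs => rw [this, p2v]
      rw [hp2, List.range_succ, List.map_append, List.reverse_append]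
      simp

theorem pow2_eq (k : Int) :
    (((PySem.List.pyRange 1 k 1).foldl
      (fun p _i => PySem.Int.mod (p.headD 0 * 2) pvMOD :: p)
      (List.replicate (min k.toNat 1) 1)).reverse)
    = (List.range k.toNat).map p2v := by
  by_cases hk : k ≤ 0
  · rw [PySem.List.pyRange_one_eq_nil (by omega)]
    have h0 : k.toNat = 0 := by omega
    have h1 : min k.toNat 1 = 0 := by omega
    simp [h0]
  · have hc : k = ((k.toNat : Nat) : Int) := by omega
    have haux := pow2_aux k (by omega) k.toNat (by omega) (le_refl _)
    rw [← hc] at haux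
    rw [haux, List.reverse_reverse]

def fvv (n : Nat) (k : Int) : Nat → Int
  | 0 => if ((0 : Nat) : Int) < k then p2v 0
      else PySem.Int.mod
        (2 * 0 - pvComb (pvFacList n) (pvInvfacList n (pvFacList n)) (((0 : Nat) : Int) - 1) (k - 1)) pvMOD
  | i + 1 => if ((i + 1 : Nat) : Int) < k then p2v (i + 1)
      else PySem.Int.mod
        (2 * fvv n k i - pvComb (pvFacList n) (pvInvfacList n (pvFacList n)) (((i + 1 : Nat) : Int) - 1) (k - 1)) pvMOD

theorem fvv_pos (n : Nat) (k : Int) (j : Nat) (h : (j : Int) < k) : fvv n k j = p2v j := by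
  cases j <;> rw [fvv, if_pos h]

theorem fvv_zero_neg (n : Nat) (k : Int) (h : ¬ ((0 : Nat) : Int) < k) :
    fvv n k 0 = PySem.Int.mod
      (2 * 0 - pvComb (pvFacList n) (pvInvfacList n (pvFacList n)) (((0 : Nat) : Int) - 1) (k - 1)) pvMOD := by
  rw [fvv, if_neg h]

theorem fvv_succ_neg (n : Nat) (k : Int) (i : Nat) (h : ¬ ((i + 1 : Nat) : Int) < k) :
    fvv n k (i + 1) = PySem.Int.mod
      (2 * fvv n k i - pvComb (pvFacList n) (pvInvfacList n (pvFacList n)) (((i + 1 : Nat) : Int) - 1) (k - 1)) pvMOD := by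
  rw [fvv, if_neg h]

theorem f_fill (n : Nat) (k : Int) :
    ∀ j, j ≤ n →
      (PySem.List.pyRange 0 (j : Int) 1).foldl
        (fun f i =>
          if i < k then PySem.List.pySetD f i (PySem.List.pyGetD ((List.range k.toNat).map p2v) i 0)
          else PySem.List.pySetD f i
            (PySem.Int.mod (2 * PySem.List.pyGetD f (i - 1) 0
              - pvComb (pvFacList n) (pvInvfacList n (pvFacList n)) (i - 1) (k - 1)) pvMOD))
        (List.replicate n 0)
      = (List.range j).map (fvv n k) ++ List.replicate (n - j) 0 := by
  intro j
  induction j with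
  | zero =>
    intro _
    rw [PySem.List.pyRange_one_eq_nil (by norm_num)]
    simp
  | succ j ih =>
    intro hj
    have hc : ((j + 1 : Nat) : Int) = ((j : Nat) : Int) + 1 := by push_cast; ring
    rw [hc, PySem.List.pyRange_one_succ_right (by positivity), List.foldl_append, ih (by omega)]
    simp only [List.foldl_cons, List.foldl_nil]
    set L : List Int := (List.range j).map (fvv n k) ++ List.replicate (n - j) 0 with hL
    have hset : ∀ x : Int, x = fvv n k j → PySem.List.pySetD L ((j : Nat) : Int) x
        = (List.range (j + 1)).map (fvv n k) ++ List.replicate (n - (j + 1)) 0 := by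
      intro x hx
      rw [PySem.List.pySetD_natCast, hL]
      rw [List.set_append_right _ _ (by simp)]
      have hrep : n - j = (n - (j + 1)) + 1 := by omega
      rw [hrep, List.replicate_succ]
      simp only [List.length_map, List.length_range, Nat.sub_self, List.set_cons_zero]
      rw [hx, List.range_succ, List.map_append]
      simp
    by_cases hjk : ((j : Nat) : Int) < k
    · rw [if_pos hjk]
      apply hset
      rw [PySem.List.pyGetD_natCast, PySem.List.getD_map_range _ _ _ _ (by omega)]
      exact (fvv_pos n k j hjk).symm
    · rw [if_neg hjk]
      apply hset
      cases j with
      | zero =>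
        have hLrep : L = List.replicate n 0 := by simp [hL]
        have hread : PySem.List.pyGetD L (((0 : Nat) : Int) - 1) 0 = 0 := by
          rw [hLrep]
          have hne : (List.replicate n (0 : Int)) ≠ [] := by
            simp
            omega
          simp only [Nat.cast_zero, zero_sub]
          rw [PySem.List.pyGetD_neg_one _ _ hne]
          simp [List.getLast_replicate]
        rw [hread, fvv_zero_neg n k hjk]
      | succ j' =>
        have hread : PySem.List.pyGetD L (((j' + 1 : Nat) : Int) - 1) 0 = fvv n k j' := by
          have hc' : ((j' + 1 : Nat) : Int) - 1 = ((j' : Nat) : Int) := by push_cast; ring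
          rw [hc', PySem.List.pyGetD_natCast, hL]
          rw [List.getD_append _ _ _ _ (by simp)]
          exact PySem.List.getD_map_range _ _ _ _ (by omega)
        rw [hread, fvv_succ_neg n k j' hjk]

theorem comb_neg (fac inv : List Int) (a b : Int) (hb : b < 0) : pvComb fac inv a b = 0 := by
  unfold pvComb
  rw [if_pos (Or.inl hb)]

theorem fvv_nonpos (n : Nat) (k : Int) (hk : k ≤ 0) : ∀ i, fvv n k i = 0 := by
  intro i
  induction i with
  | zero =>
    rw [fvv_zero_neg n k (by simp; omega)]
    rw [comb_neg _ _ _ _ (by omega)]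
    simp [PySem.Int.mod_eq_emod_of_pos pvMOD_pos]
  | succ i ih =>
    rw [fvv_succ_neg n k i (by push_cast; omega)]
    rw [comb_neg _ _ _ _ (by omega), ih]
    simp [PySem.Int.mod_eq_emod_of_pos pvMOD_pos]

theorem p2v_cast (i : Nat) : ((p2v i : Int) : ZMod 1000000007) = 2 ^ i := by
  induction i with
  | zero => simp [p2v]
  | succ i ih =>
    rw [p2v, castPy]
    push_cast
    rw [ih, pow_succ]

theorem powMod_cast (e : Nat) : ((PySem.Int.powMod 2 e pvMOD : Int) : ZMod 1000000007) = 2 ^ e := by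
  rw [PySem.Int.powMod, castPy]
  push_cast
  ring

theorem foldl_mod_cast {α : Type} (l : List α) (g : α → Int) :
    ∀ c : Int,
      ((l.foldl (fun acc x => PySem.Int.mod (acc + g x) pvMOD) c : Int) : ZMod 1000000007)
        = (c : ZMod 1000000007) + (l.map (fun x => ((g x : Int) : ZMod 1000000007))).sum := by
  induction l with
  | nil => intro c; simp
  | cons a l ih =>
    intro c
    simp only [List.foldl_cons, List.map_cons, List.sum_cons]
    rw [ih, castPy]
    push_cast
    ring

theorem foldl_mod_sub_cast (l : List Int) (g : Int → Int) :
    ∀ c : Int,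
      ((l.foldl (fun s t => PySem.Int.mod (s - g t) pvMOD) c : Int) : ZMod 1000000007)
        = (c : ZMod 1000000007) - (l.map (fun t => ((g t : Int) : ZMod 1000000007))).sum := by
  induction l with
  | nil => intro c; simp
  | cons a l ih =>
    intro c
    simp only [List.foldl_cons, List.map_cons, List.sum_cons]
    rw [ih, castPy]
    push_cast
    ring

theorem foldl_mod_range {α : Type} (h : Int → α → Int) (l : List α) :
    ∀ c : Int, 0 ≤ c → c < 1000000007 →
      0 ≤ l.foldl (fun acc x => PySem.Int.mod (h acc x) pvMOD) c
        ∧ l.foldl (fun acc x => PySem.Int.mod (h acc x) pvMOD) c < 1000000007 := by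
  induction l with
  | nil => intro c hc1 hc2; exact ⟨hc1, hc2⟩
  | cons a l ih =>
    intro c _ _
    simp only [List.foldl_cons]
    exact ih _ (modPy_range _).1 (modPy_range _).2

theorem int_eq_of_cast (a b : Int) (ha1 : 0 ≤ a) (ha2 : a < 1000000007)
    (hb1 : 0 ≤ b) (hb2 : b < 1000000007)
    (h : (a : ZMod 1000000007) = (b : ZMod 1000000007)) : a = b := by
  have hz : ((a - b : Int) : ZMod 1000000007) = 0 := by push_cast; rw [h]; ring
  rw [ZMod.intCast_zmod_eq_zero_iff_dvd] at hz
  obtain ⟨t, ht⟩ := hz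
  omega

theorem coefB_cast (fac invfac : List Int) (k i : Int) :
    ((pvCoefB fac invfac k i : Int) : ZMod 1000000007)
      = 2 ^ i.toNat
        - ((PySem.List.pyRange (k - 1) i 1).map
            (fun t => (2 : ZMod 1000000007) ^ (i - 1 - t).toNat
              * ((pvComb fac invfac t (k - 1) : Int) : ZMod 1000000007))).sum := by
  unfold pvCoefB
  rw [foldl_mod_sub_cast, powMod_cast]
  congr 1
  refine congrArg List.sum (List.map_congr_left ?_)
  intro t _
  rw [Int.cast_mul, powMod_cast]

theorem fvv_eq_coefB (n : Nat) (k : Int) (hk : 1 ≤ k) (i : Nat) :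
    ((fvv n k i : Int) : ZMod 1000000007)
      = ((pvCoefB (pvFacList n) (pvInvfacList n (pvFacList n)) k ((i : Nat) : Int) : Int)
          : ZMod 1000000007) := by
  induction i with
  | zero =>
    rw [fvv_pos n k 0 (by simpa using hk), coefB_cast]
    rw [PySem.List.pyRange_one_eq_nil (by omega)]
    simp [p2v]
  | succ i ih =>
    rw [coefB_cast]
    by_cases hik : ((i + 1 : Nat) : Int) < k
    · rw [fvv_pos n k (i + 1) hik, p2v_cast]
      rw [PySem.List.pyRange_one_eq_nil (by omega)]
      have : (((i + 1 : Nat) : Int)).toNat = i + 1 := by omega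
      rw [this]
      simp
    · rw [fvv_succ_neg n k i hik, castPy]
      rw [coefB_cast] at ih
      have hc : ((i + 1 : Nat) : Int) = ((i : Nat) : Int) + 1 := by push_cast; ring
      have hki : k - 1 ≤ ((i : Nat) : Int) := by omega
      rw [hc, PySem.List.pyRange_one_succ_right hki, List.map_append, List.sum_append]
      have htn1 : (((i : Nat) : Int) + 1).toNat = i + 1 := by omega
      have htn2 : ((i : Nat) : Int).toNat = i := by omega
      rw [htn1]
      rw [htn2] at ih
      -- the old terms double their weight, the new term (t = i) has weight 2^0 = 1
      have hmapstep :
          ((PySem.List.pyRange (k - 1) ((i : Nat) : Int) 1).map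
            (fun t => (2 : ZMod 1000000007) ^ (((i : Nat) : Int) + 1 - 1 - t).toNat
              * ((pvComb (pvFacList n) (pvInvfacList n (pvFacList n)) t (k - 1) : Int) : ZMod 1000000007))).sum
          = 2 * ((PySem.List.pyRange (k - 1) ((i : Nat) : Int) 1).map
            (fun t => (2 : ZMod 1000000007) ^ (((i : Nat) : Int) - 1 - t).toNat
              * ((pvComb (pvFacList n) (pvInvfacList n (pvFacList n)) t (k - 1) : Int) : ZMod 1000000007))).sum := by
        rw [← List.sum_map_mul_left]
        refine congrArg List.sum (List.map_congr_left ?_)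
        intro t ht
        rw [PySem.List.mem_pyRange_one] at ht
        have he : (((i : Nat) : Int) + 1 - 1 - t).toNat = (((i : Nat) : Int) - 1 - t).toNat + 1 := by omega
        rw [he, pow_succ]
        ring
      rw [hmapstep]
      have hnew : (((i : Nat) : Int) + 1 - 1 - ((i : Nat) : Int)).toNat = 0 := by omega
      simp only [List.map_cons, List.map_nil, List.sum_cons, List.sum_nil, hnew, pow_zero, one_mul,
        add_zero]
      have harg : ((i : Nat) : Int) + 1 - 1 = ((i : Nat) : Int) := by ring
      rw [harg]
      push_cast
      rw [ih]
      ring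

-- pyGetD on an all-zero list is 0 at every index (element or default alike)
theorem pyGetD_replicate_zero (m : Nat) (j : Int) :
    PySem.List.pyGetD (List.replicate m (0 : Int)) j 0 = 0 := by
  unfold PySem.List.pyGetD
  rcases h : PySem.List.pyGet? (List.replicate m (0 : Int)) j with _ | x
  · rfl
  · have := PySem.List.mem_of_pyGet?_eq_some _ h
    simp [List.eq_of_mem_replicate this]

theorem foldl_mod_zero {α : Type} (l : List α) (g : α → Int) (hg : ∀ x, g x = 0) :
    l.foldl (fun acc x => PySem.Int.mod (acc + g x) pvMOD) 0 = 0 := by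
  induction l with
  | nil => rfl
  | cons a l ih =>
    simp only [List.foldl_cons, hg a, add_zero]
    have h0 : PySem.Int.mod 0 pvMOD = 0 := by
      simp [PySem.Int.mod_eq_emod_of_pos pvMOD_pos]
    rw [h0, ih]

theorem main_eq (nums : List Int) (k : Int) : minMaxSums nums k = minMaxSums_alt nums k := by
  unfold minMaxSums minMaxSums_alt
  dsimp only
  rw [pow2_eq k]
  have hf := f_fill nums.length k nums.length (le_refl _)
  simp only [Nat.sub_self, List.replicate_zero, List.append_nil] at hf
  rw [hf]
  rw [PySem.List.enumerate_eq_map_pyRange (d := 0), List.foldl_map]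
  dsimp only
  simp only [PySem.List.len_eq, PySem.List.length_sorted]
  by_cases hk : k ≤ 0
  · -- A's f values are all 0, so A's sum is 0 = B's early return
    rw [if_pos hk]
    have hrep : (List.range nums.length).map (fvv nums.length k) = List.replicate nums.length 0 := by
      have h0 : ∀ x ∈ (List.range nums.length).map (fvv nums.length k), x = (0 : Int) := by
        intro x hx
        rw [List.mem_map] at hx
        obtain ⟨j, _, hj⟩ := hx
        rw [← hj, fvv_nonpos nums.length k hk]
      have := List.eq_replicate_of_mem h0
      simpa using this
    rw [hrep]
    have hbody : (fun (x : Int) (y : Int) => PySem.Int.mod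
          (x + PySem.List.pyGetD (PySem.List.sorted nums (fun x => x) false) y 0 *
              PySem.List.pyGetD (List.replicate nums.length 0) y 0
            + PySem.List.pyGetD (PySem.List.sorted nums (fun x => x) false) y 0 *
              PySem.List.pyGetD (List.replicate nums.length 0) ((nums.length : Int) - 1 - y) 0) pvMOD)
        = (fun (x : Int) (y : Int) => PySem.Int.mod (x + (0 : Int)) pvMOD) := by
      funext x y
      rw [pyGetD_replicate_zero, pyGetD_replicate_zero]
      simp
    rw [hbody]
    exact foldl_mod_zero _ (fun _ => (0 : Int)) (fun _ => rfl)
  · rw [if_neg hk]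
    have hbodyA : (fun (x : Int) (y : Int) => PySem.Int.mod
          (x + PySem.List.pyGetD (PySem.List.sorted nums (fun x => x) false) y 0 *
              PySem.List.pyGetD (List.map (fvv nums.length k) (List.range nums.length)) y 0
            + PySem.List.pyGetD (PySem.List.sorted nums (fun x => x) false) y 0 *
              PySem.List.pyGetD (List.map (fvv nums.length k) (List.range nums.length))
                ((nums.length : Int) - 1 - y) 0) pvMOD)
        = (fun (x : Int) (y : Int) => PySem.Int.mod
          (x + (PySem.List.pyGetD (PySem.List.sorted nums (fun x => x) false) y 0 *
              PySem.List.pyGetD (List.map (fvv nums.length k) (List.range nums.length)) y 0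
            + PySem.List.pyGetD (PySem.List.sorted nums (fun x => x) false) y 0 *
              PySem.List.pyGetD (List.map (fvv nums.length k) (List.range nums.length))
                ((nums.length : Int) - 1 - y) 0)) pvMOD) := by
      funext x y
      rw [add_assoc]
    rw [hbodyA]
    apply int_eq_of_cast
    · exact (foldl_mod_range _ _ 0 (by norm_num) (by norm_num)).1
    · exact (foldl_mod_range _ _ 0 (by norm_num) (by norm_num)).2
    · exact (foldl_mod_range _ _ 0 (by norm_num) (by norm_num)).1
    · exact (foldl_mod_range _ _ 0 (by norm_num) (by norm_num)).2
    rw [foldl_mod_cast, foldl_mod_cast]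
    congr 1
    refine congrArg List.sum (List.map_congr_left ?_)
    intro j hj
    rw [PySem.List.mem_pyRange_one] at hj
    obtain ⟨hj0, hjn⟩ := hj
    have hjt : j = ((j.toNat : Nat) : Int) := by omega
    set t : Nat := j.toNat with htdef
    have ht : t < nums.length := by omega
    rw [hjt]
    have hidx : ((nums.length : Int) - 1 - ((t : Nat) : Int)) = ((nums.length - 1 - t : Nat) : Int) := by
      omega
    rw [hidx]
    simp only [PySem.List.pyGetD_natCast]
    rw [PySem.List.getD_map_range _ _ _ _ ht, PySem.List.getD_map_range _ _ _ _ (by omega)]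
    rw [Int.cast_add, Int.cast_mul, Int.cast_mul, Int.cast_mul]
    rw [fvv_eq_coefB nums.length k (by omega) t, fvv_eq_coefB nums.length k (by omega) (nums.length - 1 - t)]
    push_cast
    have hidx2 : ((nums.length - 1 - t : Nat) : Int) = -1 + (nums.length : Int) - (t : Int) := by omega
    rw [hidx2]
    ring

-- ===== VERDICT (by name: the statement is the Claim_ definition above) =====
theorem minMaxSums_spec : Claim_equal_minMaxSums := by
  intro nums k _hdom
  exact main_eq nums k
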